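-- pv_equiv track=rewrite | github.com/geethdev/IEEE-Xtreme-18.0 | cheap-construction.py | find_minimum_lengths
-- ===== SOURCE A (Python) =====
-- def count_components(S, T):
--     n = len(S)
--     positions = []
--
--     start = 0
--     while True:
--         start = S.find(T, start)
--         if start == -1:
--             break
--         positions.append(start)
--         start += 1
--
--     if not positions:
--         return n + 1
--     parent = list(range(n))
--
--     def find(x):
--         if parent[x] != x:
--             parent[x] = find(parent[x])
--         return parent[x]
--
--     def union(x, y):
--         rootX = find(x)
--         rootY = find(y)
--         if rootX != rootY:
--             parent[rootY] = rootX
--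
--     for pos in positions:
--         for i in range(pos, pos + len(T) - 1):
--             union(i, i + 1)
--
--     components = set(find(i) for i in range(n))
--     return len(components)
--
-- def find_minimum_lengths(S):
--     N = len(S)
--     min_lengths = [float('inf')] * (N + 1)
--
--     for length in range(1, N + 1):
--         seen = set()
--
--         for i in range(N - length + 1):
--             T = S[i:i + length]
--             if T in seen:
--                 continue
--             seen.add(T)
--
--             components = count_components(S, T)
--             if components <= N:
--                 min_lengths[components] = min(min_lengths[components], length)
--
--
--     result = [length if length != float('inf') else 0 for length in min_lengths[1:]]
--     return result
-- ===== SOURCE B (Python) =====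
-- def find_minimum_lengths(S):
--     N = len(S)
--     best = [0] * (N + 1)  # 0 = "not achievable yet"; lengths are tried in increasing order
--     for length in range(1, N + 1):
--         groups = {}
--         for i in range(N - length + 1):
--             groups.setdefault(S[i:i + length], []).append(i)
--         for occ in groups.values():
--             covered = [False] * (N - 1)
--             for p in occ:
--                 for j in range(p, p + length - 1):
--                     covered[j] = True
--             c = N - sum(covered)
--             if best[c] == 0:
--                 best[c] = length
--     return best[1:]
-- ===== Notes on version B (the rewrite author's own statement) =====
-- stated objective: faster
-- what changed: Per length, occurrences of every substring are grouped in one dict pass (instead of a find-scan per substring), components are counted by marking covered adjacent-pair edges in a boolean array (n - #marked) instead of union-find with path compression, and since lengths grow the first value assigned to a component count is already the minimum, removing the inf/min bookkeeping.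
import Mathlib
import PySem

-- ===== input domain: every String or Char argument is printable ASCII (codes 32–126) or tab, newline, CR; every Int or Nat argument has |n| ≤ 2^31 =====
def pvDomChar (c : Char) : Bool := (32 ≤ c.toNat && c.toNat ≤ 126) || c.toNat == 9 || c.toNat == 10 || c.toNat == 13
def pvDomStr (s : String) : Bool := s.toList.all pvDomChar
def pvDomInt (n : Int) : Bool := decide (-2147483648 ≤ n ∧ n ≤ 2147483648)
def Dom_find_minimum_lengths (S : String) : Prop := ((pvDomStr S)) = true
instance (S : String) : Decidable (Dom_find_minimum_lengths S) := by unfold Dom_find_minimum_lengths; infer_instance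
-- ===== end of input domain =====

-- B replaces A's per-substring find-scan + union-find component counting by one dict grouping pass per
-- length and a covered-edge marking array (components = n - covered edges); first assignment wins, so no inf/min.
set_option maxHeartbeats 1000000

-- ===== PORT A =====
def pvFindAllAux (s T : List Char) (fuel : Nat) (start : Int) (acc : List Int) : List Int :=
  match fuel with
  | 0 => acc
  | f+1 =>
    let p := PySem.Chars.findFrom s T start none
    if p = -1 then acc else pvFindAllAux s T f (p+1) (acc ++ [p])

def pvDsuFind (fuel : Nat) (parent : List Int) (x : Int) : List Int × Int :=
  match fuel with
  | 0 => (parent, x)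
  | f+1 =>
    let px := PySem.List.pyGetD parent x 0
    if px ≠ x then
      let r := pvDsuFind f parent px
      (PySem.List.pySetD r.1 x r.2, r.2)
    else (parent, x)

def pvDsuUnion (parent : List Int) (x y : Int) : List Int :=
  let f1 := pvDsuFind (parent.length+1) parent x
  let f2 := pvDsuFind (f1.1.length+1) f1.1 y
  if f1.2 ≠ f2.2 then PySem.List.pySetD f2.1 f2.2 f1.2 else f2.1

def pvCountComponents (s T : List Char) : Int :=
  let n := s.length
  let positions := pvFindAllAux s T (n+2) 0 []
  if positions = [] then (n : Int) + 1
  else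
    let parent0 : List Int := PySem.List.pyRange 0 (n : Int) 1
    let parent1 := positions.foldl (fun par pos =>
      (PySem.List.pyRange pos (pos + (T.length : Int) - 1) 1).foldl
        (fun par i => pvDsuUnion par i (i+1)) par) parent0
    let st := (PySem.List.pyRange 0 (n:Int) 1).foldl
      (fun (st : List Int × PySem.Set Int) i =>
        let r := pvDsuFind (st.1.length+1) st.1 i
        (r.1, PySem.Set.add st.2 r.2)) (parent1, (PySem.Set.empty : PySem.Set Int))
    (PySem.Set.len st.2 : Int)

def find_minimum_lengths (S : String) : List Int :=
  let s := S.toList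
  let N := s.length
  let init : List (Option Int) := List.replicate (N+1) none
  let final := (PySem.List.pyRange 1 ((N:Int)+1) 1).foldl (fun ml length =>
    ((PySem.List.pyRange 0 ((N:Int) - length + 1) 1).foldl
      (fun (st : PySem.Set (List Char) × List (Option Int)) i =>
        let T := PySem.List.slice s (some i) (some (i + length))
        if PySem.Set.contains st.1 T then st
        else
          let seen' := PySem.Set.add st.1 T
          let c := pvCountComponents s T
          if c ≤ (N:Int) then
            let v : Option Int := match PySem.List.pyGetD st.2 c none with
              | none => some length
              | some w => some (min w length)
            (seen', PySem.List.pySetD st.2 c v)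
          else (seen', st.2))
      ((PySem.Set.empty : PySem.Set (List Char)), ml)).2) init
  (final.drop 1).map (fun o => o.getD 0)


-- ===== PORT B =====
def find_minimum_lengths_alt (S : String) : List Int :=
  let s := S.toList
  let N := s.length
  let best0 : List Int := List.replicate (N+1) 0
  let final := (PySem.List.pyRange 1 ((N:Int)+1) 1).foldl (fun best length =>
    let groups := (PySem.List.pyRange 0 ((N:Int) - length + 1) 1).foldl
      (fun (d : PySem.Dict (List Char) (List Int)) i =>
        d.modify (PySem.List.slice s (some i) (some (i + length))) [] (· ++ [i])) PySem.Dict.empty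
    groups.values.foldl (fun best occ =>
      let covered := occ.foldl (fun cov p =>
        (PySem.List.pyRange p (p + length - 1) 1).foldl
          (fun cov j => PySem.List.pySetD cov j true) cov) (List.replicate (N-1) false)
      let c := (N : Int) - (covered.count true : Int)
      if PySem.List.pyGetD best c 0 = 0 then PySem.List.pySetD best c length else best) best) best0
  final.drop 1


-- ===== PRECONDITION & SPEC =====
def Spec_find_minimum_lengths (S : String) (out : List Int) : Prop := out = find_minimum_lengths_alt S
instance (S : String) (out : List Int) : Decidable (Spec_find_minimum_lengths S out) := by unfold Spec_find_minimum_lengths; infer_instance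

-- ===== CLAIM (what is proved, stated in full; the proofs are below) =====
def Claim_equal_find_minimum_lengths : Prop := ∀ (S : String), Dom_find_minimum_lengths S → Spec_find_minimum_lengths S (find_minimum_lengths S)

-- ===== LEMMAS AND PROOFS =====
def pvLeader (e : List Bool) : Nat → Nat
  | 0 => 0
  | x+1 => if e.getD x false then pvLeader e x else x+1

lemma pvLeader_le (e : List Bool) (x : Nat) : pvLeader e x ≤ x := by
  induction x with
  | zero => simp [pvLeader]
  | succ x ih => simp only [pvLeader]; split <;> omega

lemma pvLeader_idem (e : List Bool) (x : Nat) : pvLeader e (pvLeader e x) = pvLeader e x := by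
  induction x with
  | zero => simp [pvLeader]
  | succ x ih =>
    simp only [pvLeader]
    split
    · exact ih
    · simp only [pvLeader]; split <;> simp_all

lemma pvLeader_congr (e1 e2 : List Bool) (h : ∀ j, e1.getD j false = e2.getD j false) (x : Nat) :
    pvLeader e1 x = pvLeader e2 x := by
  induction x with
  | zero => simp [pvLeader]
  | succ x ih => simp only [pvLeader, h, ih]

def pvGood (n : Nat) (par : List Int) (e : List Bool) : Prop :=
  par.length = n ∧ e.length = n - 1 ∧
  ∀ x, x < n → ∃ y : Nat, par.getD x 0 = (y:Int) ∧ y ≤ x ∧ pvLeader e y = pvLeader e x ∧ (y = x → pvLeader e x = x)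

lemma pvGood_congr {n par e1 e2} (h : ∀ j, e1.getD j false = e2.getD j false)
    (hl : e1.length = e2.length) (hg : pvGood n par e1) : pvGood n par e2 := by
  obtain ⟨h1, h2, h3⟩ := hg
  refine ⟨h1, hl ▸ h2, fun x hx => ?_⟩
  obtain ⟨y, hy1, hy2, hy3, hy4⟩ := h3 x hx
  exact ⟨y, hy1, hy2, by rw [← pvLeader_congr e1 e2 h, ← pvLeader_congr e1 e2 h, hy3],
    fun he => by rw [← pvLeader_congr e1 e2 h]; exact hy4 he⟩

lemma pvFind_spec {n : Nat} (e : List Bool) :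
    ∀ (fuel : Nat) (par : List Int) (x : Nat), pvGood n par e → x < n → x < fuel →
      (pvDsuFind fuel par (x:Int)).2 = ((pvLeader e x : Nat) : Int) ∧
      pvGood n (pvDsuFind fuel par (x:Int)).1 e := by
  intro fuel
  induction fuel with
  | zero => intro par x _ _ h; omega
  | succ f ih =>
    intro par x hg hx hfx
    obtain ⟨y, hy1, hy2, hy3, hy4⟩ := hg.2.2 x hx
    by_cases hxy : y = x
    · subst hxy
      have : pvDsuFind (f+1) par (y:Int) = (par, (y:Int)) := by
        simp [pvDsuFind, PySem.List.pyGetD_natCast, ← List.getD_eq_getElem?_getD, hy1]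
      rw [this]
      exact ⟨by rw [hy4 rfl], hg⟩
    · have hylt : y < x := lt_of_le_of_ne hy2 hxy
      have step : pvDsuFind (f+1) par (x:Int) =
          (PySem.List.pySetD (pvDsuFind f par (y:Int)).1 (x:Int) (pvDsuFind f par (y:Int)).2,
            (pvDsuFind f par (y:Int)).2) := by
        simp only [pvDsuFind, PySem.List.pyGetD_natCast, ← List.getD_eq_getElem?_getD, hy1]
        rw [if_pos (by exact_mod_cast hxy)]
      obtain ⟨ih1, ih2⟩ := ih par y hg (by omega) (by omega)
      rw [step]
      constructor
      · simp only [ih1, hy3]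
      · -- pvGood of the path-compressed parent
        rw [ih1]
        obtain ⟨g1, g2, g3⟩ := ih2
        have hset : PySem.List.pySetD (pvDsuFind f par (y:Int)).1 (x:Int) ((pvLeader e y : Nat):Int)
            = (pvDsuFind f par (y:Int)).1.set x ((pvLeader e y : Nat):Int) := by
          simp [PySem.List.pySetD_natCast]
        rw [hset]
        refine ⟨by simp [g1], g2, fun z hz => ?_⟩
        by_cases hzx : z = x
        · subst hzx
          refine ⟨pvLeader e y, ?_, ?_, ?_, ?_⟩
          · rw [List.getD_eq_getElem?_getD, List.getElem?_set_self (by omega)]; simp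
          · calc pvLeader e y ≤ y := pvLeader_le e y
              _ ≤ z := hy2
          · rw [pvLeader_idem, hy3]
          · intro hh; rw [← hh]; exact pvLeader_idem e y
        · obtain ⟨w, hw1, hw2, hw3, hw4⟩ := g3 z hz
          refine ⟨w, ?_, hw2, hw3, hw4⟩
          rw [List.getD_eq_getElem?_getD, List.getElem?_set_ne (by omega)]
          rw [List.getD_eq_getElem?_getD] at hw1
          exact hw1

lemma pvLeader_set_of_le (e : List Bool) (i : Nat) (b : Bool) :
    ∀ x, x ≤ i → pvLeader (e.set i b) x = pvLeader e x := by
  intro x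
  induction x with
  | zero => intro _; rfl
  | succ x ih =>
    intro hx
    have hgd : (e.set i b).getD x false = e.getD x false := by
      rw [List.getD_eq_getElem?_getD, List.getD_eq_getElem?_getD, List.getElem?_set_ne (by omega)]
    simp only [pvLeader, hgd]
    split
    · exact ih (by omega)
    · rfl

lemma pvLeader_set_true (e : List Bool) (i : Nat) (hi : i < e.length)
    (hei : e.getD i false = false) :
    ∀ x, pvLeader (e.set i true) x = if pvLeader e x = i+1 then pvLeader e i else pvLeader e x := by
  intro x
  induction x with
  | zero => simp [pvLeader]
  | succ x ih =>
    by_cases hxi : x = i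
    · subst hxi
      have h1 : (e.set x true).getD x false = true := by
        rw [List.getD_eq_getElem?_getD, List.getElem?_set_self hi]; rfl
      simp only [pvLeader, h1, hei, if_true, if_false]
      rw [pvLeader_set_of_le e x true x le_rfl]
      simp
    · have hgd : (e.set i true).getD x false = e.getD x false := by
        rw [List.getD_eq_getElem?_getD, List.getD_eq_getElem?_getD, List.getElem?_set_ne (by omega)]
      simp only [pvLeader, hgd]
      by_cases hex : e.getD x false = true
      · simp only [hex, if_true]; exact ih
      · simp only [Bool.not_eq_true] at hex
        simp only [hex, Bool.false_eq_true, if_false]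
        rw [if_neg (by omega)]

lemma pvUnion_spec {n : Nat} {par : List Int} {e : List Bool} (hg : pvGood n par e)
    (i : Nat) (hi : i + 1 < n) :
    pvGood n (pvDsuUnion par (i:Int) ((i:Int)+1)) (e.set i true) := by
  have hlen : par.length = n := hg.1
  have helen : e.length = n - 1 := hg.2.1
  have hilen : i < e.length := by omega
  have hf1 := pvFind_spec (n := n) e (par.length+1) par i hg (by omega) (by omega)
  set p1 := (pvDsuFind (par.length+1) par (i:Int)).1 with hp1
  have hp1len : p1.length = n := hf1.2.1
  have hcast : ((i:Int) + 1) = ((i+1 : Nat) : Int) := by push_cast; ring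
  have hf2 := pvFind_spec (n := n) e (p1.length+1) p1 (i+1) hf1.2 (by omega) (by omega)
  rw [← hcast] at hf2
  set p2 := (pvDsuFind (p1.length+1) p1 ((i:Int)+1)).1 with hp2
  have hunion : pvDsuUnion par (i:Int) ((i:Int)+1) =
      if (pvDsuFind (par.length+1) par (i:Int)).2 ≠ (pvDsuFind (p1.length+1) p1 ((i:Int)+1)).2 then
        PySem.List.pySetD p2 (pvDsuFind (p1.length+1) p1 ((i:Int)+1)).2 (pvDsuFind (par.length+1) par (i:Int)).2
      else p2 := rfl
  by_cases hei : e.getD i false = true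
  · -- already connected: union is a no-op; set i true is pointwise equal to e
    have hll : pvLeader e (i+1) = pvLeader e i := by simp only [pvLeader]; rw [hei]; simp
    have heq : (pvDsuFind (par.length+1) par (i:Int)).2 = (pvDsuFind (p1.length+1) p1 ((i:Int)+1)).2 := by
      rw [hf1.1, hf2.1, hll]
    rw [hunion, if_neg (by simp [heq])]
    refine pvGood_congr ?_ (by simp) hf2.2
    intro j
    by_cases hj : j = i
    · subst hj
      rw [List.getD_eq_getElem?_getD, List.getD_eq_getElem?_getD, List.getElem?_set_self hilen]
      rw [List.getD_eq_getElem?_getD] at hei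
      cases h : e[j]? with
      | none => rw [h] at hei; simp at hei
      | some b => rw [h] at hei; simp at hei; simp [h, hei]
    · rw [List.getD_eq_getElem?_getD, List.getD_eq_getElem?_getD, List.getElem?_set_ne (by omega)]
  · -- new edge
    replace hei : e.getD i false = false := by simpa using hei
    have hl1 : pvLeader e (i+1) = i+1 := by simp only [pvLeader]; rw [hei]; simp
    have hne : (pvDsuFind (par.length+1) par (i:Int)).2 ≠ (pvDsuFind (p1.length+1) p1 ((i:Int)+1)).2 := by
      rw [hf1.1, hf2.1, hl1]
      intro h
      have h' : pvLeader e i = i + 1 := by exact_mod_cast h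
      have := pvLeader_le e i; omega
    rw [hunion, if_pos hne, hf1.1, hf2.1, hl1, PySem.List.pySetD_natCast]
    have hchar := pvLeader_set_true e i hilen hei
    obtain ⟨g1, g2, g3⟩ := hf2.2
    refine ⟨by simp [g1], by simp; omega, fun z hz => ?_⟩
    by_cases hzi : z = i + 1
    · subst hzi
      refine ⟨pvLeader e i, ?_, by have := pvLeader_le e i; omega, ?_, ?_⟩
      · rw [List.getD_eq_getElem?_getD, List.getElem?_set_self (by omega)]; simp
      · rw [hchar, hchar]
        have hle : pvLeader e (pvLeader e i) = pvLeader e i := pvLeader_idem e i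
        have hne2 : pvLeader e (pvLeader e i) ≠ i + 1 := by
          rw [hle]; have := pvLeader_le e i; omega
        rw [if_neg hne2, hle, if_pos (by rw [hl1])]
      · intro hh; have := pvLeader_le e i; omega
    · obtain ⟨w, hw1, hw2, hw3, hw4⟩ := g3 z hz
      refine ⟨w, ?_, hw2, ?_, ?_⟩
      · rw [List.getD_eq_getElem?_getD, List.getElem?_set_ne (by omega),
          ← List.getD_eq_getElem?_getD]; exact hw1
      · rw [hchar, hchar, hw3]
      · intro hwz
        subst hwz
        have hfix := hw4 rfl
        rw [hchar, if_neg (by rw [hfix]; omega), hfix]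

lemma pvRangeFold_spec {n : Nat} : ∀ (k : Nat) (a b : Int) (par : List Int) (e : List Bool),
    (b - a).toNat = k → 0 ≤ a → b ≤ (n:Int) - 1 → pvGood n par e →
    pvGood n ((PySem.List.pyRange a b 1).foldl (fun par i => pvDsuUnion par i (i+1)) par)
             ((PySem.List.pyRange a b 1).foldl (fun cov j => PySem.List.pySetD cov j true) e) := by
  intro k
  induction k with
  | zero =>
    intro a b par e hk ha hb hg
    rw [PySem.List.pyRange_one_eq_nil (by omega)]
    exact hg
  | succ k ih =>
    intro a b par e hk ha hb hg
    obtain ⟨aN, rfl⟩ : ∃ m : Nat, a = (m:Int) := ⟨a.toNat, by omega⟩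
    rw [PySem.List.pyRange_one_cons (by omega)]
    simp only [List.foldl_cons]
    have hset : PySem.List.pySetD e (aN:Int) true = e.set aN true := by
      rw [PySem.List.pySetD_natCast]
    have hstep : pvGood n (pvDsuUnion par (aN:Int) ((aN:Int)+1)) (PySem.List.pySetD e (aN:Int) true) := by
      rw [hset]
      exact pvUnion_spec hg aN (by omega)
    exact ih ((aN:Int)+1) b _ _ (by omega) (by omega) hb hstep

lemma pvPosFold_spec {n : Nat} (c : Int) : ∀ (P : List Int) (par : List Int) (e : List Bool),
    (∀ p ∈ P, 0 ≤ p ∧ p + c - 1 ≤ (n:Int) - 1) → pvGood n par e →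
    pvGood n (P.foldl (fun par pos => (PySem.List.pyRange pos (pos + c - 1) 1).foldl
                (fun par i => pvDsuUnion par i (i+1)) par) par)
             (P.foldl (fun cov p => (PySem.List.pyRange p (p + c - 1) 1).foldl
                (fun cov j => PySem.List.pySetD cov j true) cov) e) := by
  intro P
  induction P with
  | nil => intro par e _ hg; exact hg
  | cons p P ih =>
    intro par e hP hg
    simp only [List.foldl_cons]
    exact ih _ _ (fun q hq => hP q (List.mem_cons_of_mem _ hq))
      (pvRangeFold_spec (p + c - 1 - p).toNat p (p + c - 1) par e rfl (hP p (List.mem_cons_self)).1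
        (hP p (List.mem_cons_self)).2 hg)

lemma pvLeader_replicate_false (m x : Nat) : pvLeader (List.replicate m false) x = x := by
  induction x with
  | zero => rfl
  | succ x ih =>
    have : (List.replicate m false).getD x false = false := by
      rw [List.getD_eq_getElem?_getD, List.getElem?_replicate]
      split <;> rfl
    simp [pvLeader, this]

lemma pvGood_init (n : Nat) :
    pvGood n (PySem.List.pyRange 0 (n:Int) 1) (List.replicate (n-1) false) := by
  refine ⟨by simp [PySem.List.length_pyRange_one], by simp, fun x hx => ?_⟩
  refine ⟨x, ?_, le_rfl, rfl, fun _ => pvLeader_replicate_false _ x⟩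
  rw [PySem.List.pyRange_one, List.getD_eq_getElem?_getD, List.getElem?_map,
    List.getElem?_range (by simpa using hx)]
  simp

lemma pvRootsFold_spec {n : Nat} (e : List Bool) : ∀ (l : List Int) (par : List Int) (S0 : PySem.Set Int),
    pvGood n par e → (∀ i ∈ l, 0 ≤ i ∧ i < (n:Int)) →
    (l.foldl (fun (st : List Int × PySem.Set Int) i =>
        ((pvDsuFind (st.1.length+1) st.1 i).1,
          PySem.Set.add st.2 (pvDsuFind (st.1.length+1) st.1 i).2)) (par, S0)).2
      = l.foldl (fun s i => PySem.Set.add s ((pvLeader e i.toNat : Nat):Int)) S0 := by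
  intro l
  induction l with
  | nil => intro par S0 _ _; rfl
  | cons i l ih =>
    intro par S0 hg hl
    obtain ⟨hi0, hin⟩ := hl i (List.mem_cons_self)
    have hplen := hg.1
    obtain ⟨x, rfl⟩ : ∃ m : Nat, i = (m:Int) := ⟨i.toNat, by omega⟩
    have hf := pvFind_spec (n := n) e (par.length+1) par x hg (by omega) (by omega)
    simp only [List.foldl_cons]
    rw [ih _ _ hf.2 (fun j hj => hl j (List.mem_cons_of_mem _ hj)), hf.1]
    simp

lemma pvLeader_append (e : List Bool) (b : Bool) : ∀ x, x ≤ e.length →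
    pvLeader (e ++ [b]) x = pvLeader e x := by
  intro x
  induction x with
  | zero => intro _; rfl
  | succ x ih =>
    intro hx
    have : (e ++ [b]).getD x false = e.getD x false := by
      rw [List.getD_eq_getElem?_getD, List.getD_eq_getElem?_getD, List.getElem?_append_left (by omega)]
    simp only [pvLeader, this]
    split
    · exact ih (by omega)
    · rfl

lemma pvCount_leaders (e : List Bool) :
    (PySem.Set.ofList ((List.range (e.length+1)).map (fun x => ((pvLeader e x : Nat):Int)))).length
      = e.length + 1 - e.count true := by
  induction e using List.reverseRecOn with
  | nil => rfl
  | append_singleton e b ih =>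
    have hlen : (e ++ [b]).length = e.length + 1 := by simp
    rw [hlen, List.range_succ, List.map_append]
    have hmap : (List.range (e.length+1)).map (fun x => ((pvLeader (e ++ [b]) x : Nat):Int))
        = (List.range (e.length+1)).map (fun x => ((pvLeader e x : Nat):Int)) := by
      refine List.map_congr_left (fun x hx => ?_)
      rw [pvLeader_append e b x (by simp at hx; omega)]
    rw [hmap]
    have hgd : (e ++ [b]).getD e.length false = b := by
      rw [List.getD_eq_getElem?_getD, List.getElem?_append_right (le_refl _)]
      simp
    cases b
    · -- b = false: new fixpoint appended
      have hlast : pvLeader (e ++ [false]) (e.length + 1) = e.length + 1 := by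
        simp only [pvLeader, hgd]
        simp
      simp only [List.map_cons, List.map_nil, hlast]
      rw [PySem.Set.ofList_append_singleton]
      rw [PySem.Set.add_of_not_mem ?_]
      · rw [List.length_append, ih]
        have := List.count_le_length (l := e) (a := true)
        simp [List.count_append]
        omega
      · intro hmem
        rw [PySem.Set.mem_ofList, List.mem_map] at hmem
        obtain ⟨x, hx, hv⟩ := hmem
        have hxle : x < e.length + 1 := by simpa using hx
        have h1 := pvLeader_le e x
        have h2 : pvLeader e x = e.length + 1 := by exact_mod_cast hv
        omega
    · -- b = true: duplicate root
      have hlast : pvLeader (e ++ [true]) (e.length + 1) = pvLeader e e.length := by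
        simp only [pvLeader, hgd]
        rw [if_pos trivial]
        exact pvLeader_append e true e.length le_rfl
      simp only [List.map_cons, List.map_nil, hlast]
      rw [PySem.Set.ofList_append_singleton]
      rw [PySem.Set.add_of_mem ?_]
      · rw [ih, List.count_append]
        simp
      · rw [PySem.Set.mem_ofList, List.mem_map]
        exact ⟨e.length, by simp, by simp⟩


lemma pvFindAllAux_eq (s T : List Char) (hT : T ≠ []) :
    ∀ (fuel : Nat) (start : Nat) (acc : List Int), s.length + 1 - start ≤ fuel → start ≤ s.length →
    pvFindAllAux s T fuel (start:Int) acc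
      = acc ++ (PySem.List.pyRange (start:Int) ((s.length:Int) - (T.length:Int) + 1) 1).filter
          (fun i => decide (T <+: s.drop i.toNat)) := by
  intro fuel
  induction fuel with
  | zero => intro start acc hf hs; omega
  | succ f ih =>
    intro start acc hf hs
    by_cases hp : PySem.Chars.findFrom s T (start:Int) none = -1
    · have hni : ¬ T <:+: s.drop start :=
        (PySem.Chars.findFrom_natCast_eq_neg_one_iff s T start hs).1 hp
      have hfil : (PySem.List.pyRange (start:Int) ((s.length:Int) - (T.length:Int) + 1) 1).filter
          (fun i => decide (T <+: s.drop i.toNat)) = [] := by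
        rw [List.filter_eq_nil_iff]
        intro i hi
        rw [PySem.List.mem_pyRange_one] at hi
        simp only [decide_eq_true_eq]
        intro hpre
        apply hni
        have h1 : s.drop i.toNat = (s.drop start).drop (i.toNat - start) := by
          rw [List.drop_drop]
          congr 1
          omega
        rw [h1] at hpre
        exact hpre.isInfix.trans (List.drop_suffix _ _).isInfix
      rw [hfil, List.append_nil]
      simp [pvFindAllAux, hp]
    · obtain ⟨hple, hpref, hmin⟩ := PySem.Chars.findFrom_natCast_spec s T start hs hp
      set p := PySem.Chars.findFrom s T (start:Int) none with hpdef
      have hp0 : (0:Int) ≤ p := le_trans (by exact_mod_cast Nat.zero_le start) hple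
      have hpcast : p = ((p.toNat : Nat) : Int) := by omega
      have hTlen : 1 ≤ T.length := by
        cases T with | nil => exact absurd rfl hT | cons a t => simp
      have hplen : p.toNat + T.length ≤ s.length := by
        have := hpref.length_le
        rw [List.length_drop] at this
        omega
      have hstep : pvFindAllAux s T (f+1) (start:Int) acc = pvFindAllAux s T f (p+1) (acc ++ [p]) := by
        simp only [pvFindAllAux, ← hpdef, if_neg hp]
      rw [hstep, hpcast]
      have hc1 : ((p.toNat:Int)) + 1 = (((p.toNat + 1 : Nat)) : Int) := by push_cast; ring
      rw [hc1, ih (p.toNat + 1) _ (by omega) (by omega)]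
      have h2 : PySem.List.pyRange ((p.toNat:Nat):Int) ((s.length:Int) - (T.length:Int) + 1) 1
          = ((p.toNat:Nat):Int) :: PySem.List.pyRange (((p.toNat+1:Nat)):Int) ((s.length:Int) - (T.length:Int) + 1) 1 := by
        rw [PySem.List.pyRange_one_cons (by push_cast; omega)]
        congr 2
      have hsplit : PySem.List.pyRange (start:Int) ((s.length:Int) - (T.length:Int) + 1) 1
          = PySem.List.pyRange (start:Int) ((p.toNat:Nat):Int) 1
            ++ ((p.toNat:Nat):Int) :: PySem.List.pyRange (((p.toNat+1:Nat)):Int) ((s.length:Int) - (T.length:Int) + 1) 1 := by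
        rw [PySem.List.pyRange_one_append (start:Int) ((p.toNat:Nat):Int) _ (by omega) (by push_cast; omega), h2]
      rw [hsplit, List.filter_append, List.filter_cons]
      have hfil1 : (PySem.List.pyRange (start:Int) ((p.toNat:Nat):Int) 1).filter
          (fun i => decide (T <+: s.drop i.toNat)) = [] := by
        rw [List.filter_eq_nil_iff]
        intro i hi
        rw [PySem.List.mem_pyRange_one] at hi
        simp only [decide_eq_true_eq]
        exact hmin i.toNat (by omega) (by omega)
      have hkeep : (decide (T <+: s.drop ((p.toNat:Nat):Int).toNat)) = true := by
        simp only [Int.toNat_natCast, decide_eq_true_eq]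
        exact hpref
      rw [hfil1, hkeep]
      simp

-- ===== dict grouping =====
lemma pvGroups_keys (l : List Int) (key : Int → List Char) :
    (l.foldl (fun d i => d.modify (key i) [] (· ++ [i])) (PySem.Dict.empty : PySem.Dict (List Char) (List Int))).keys
      = PySem.Set.ofList (l.map key) := by
  rw [PySem.Dict.keys_foldl_modify_key]
  simp [PySem.Set.update_nil_left]

lemma pvGroups_nodup (l : List Int) (key : Int → List Char) :
    (l.foldl (fun d i => d.modify (key i) [] (· ++ [i])) (PySem.Dict.empty : PySem.Dict (List Char) (List Int))).keys.Nodup := by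
  exact PySem.Dict.nodup_keys_foldl_modify_key l key [] (fun d i => (· ++ [i])) _ (by simp)

lemma pvGroups_getD (l : List Int) (key : Int → List Char) (T : List Char) :
    (l.foldl (fun d i => d.modify (key i) [] (· ++ [i])) (PySem.Dict.empty : PySem.Dict (List Char) (List Int))).getD T []
      = l.filter (fun i => key i == T) := by
  have hfold : l.foldl (fun d i => d.modify (key i) [] (· ++ [i])) (PySem.Dict.empty : PySem.Dict (List Char) (List Int))
      = (l.map (fun i => (key i, i))).foldl (fun d p => d.modify p.1 [] (· ++ [p.2])) PySem.Dict.empty := by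
    rw [List.foldl_map]
  rw [hfold, PySem.Dict.getD_foldl_modify_append]
  rw [List.filter_map]
  simp only [List.map_map]
  have : ((fun p : (List Char) × Int => p.2) ∘ (fun i => (key i, i))) = id := rfl
  rw [this, List.map_id]
  simp [Function.comp_def]

lemma pvGroups_values (l : List Int) (key : Int → List Char) :
    (l.foldl (fun d i => d.modify (key i) [] (· ++ [i])) (PySem.Dict.empty : PySem.Dict (List Char) (List Int))).values
      = (PySem.Set.ofList (l.map key)).map (fun T => l.filter (fun i => key i == T)) := by
  rw [PySem.Dict.values_eq_map_keys _ (pvGroups_nodup l key) []]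
  rw [pvGroups_keys]
  exact List.map_congr_left (fun T _ => pvGroups_getD l key T)

-- ===== seen-set skipping = fold over first occurrences =====
def pvNews (seen : PySem.Set (List Char)) : List (List Char) → List (List Char)
  | [] => []
  | T :: r => if T ∈ seen then pvNews seen r else T :: pvNews (PySem.Set.add seen T) r

lemma pvA_fold (F : List (Option Int) → List Char → List (Option Int)) :
    ∀ (ks : List (List Char)) (seen : PySem.Set (List Char)) (ml : List (Option Int)),
    (ks.foldl (fun st T => if PySem.Set.contains st.1 T then st
        else (PySem.Set.add st.1 T, F st.2 T)) (seen, ml)).2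
      = (pvNews seen ks).foldl F ml := by
  intro ks
  induction ks with
  | nil => intro seen ml; rfl
  | cons T r ih =>
    intro seen ml
    simp only [List.foldl_cons, pvNews]
    by_cases h : T ∈ seen
    · rw [if_pos ((PySem.Set.contains_iff _ _).2 h), if_pos h]
      exact ih seen ml
    · rw [if_neg (fun hc => h ((PySem.Set.contains_iff _ _).1 hc)), if_neg h]
      exact ih _ _

lemma pvNews_update : ∀ (ks : List (List Char)) (seen : PySem.Set (List Char)), seen.Nodup →
    PySem.Set.update seen ks = seen ++ pvNews seen ks := by
  intro ks
  induction ks with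
  | nil => intro seen _; simp [PySem.Set.update_nil, pvNews]
  | cons T r ih =>
    intro seen hnd
    rw [PySem.Set.update_cons, pvNews]
    by_cases h : T ∈ seen
    · rw [PySem.Set.add_of_mem h, if_pos h]
      exact ih seen hnd
    · rw [PySem.Set.add_of_not_mem h, if_neg h]
      rw [ih (seen ++ [T]) (by simp [List.nodup_append, hnd]; exact fun a ha hEq => h (hEq ▸ ha))]
      simp

lemma pvNews_nil_eq (ks : List (List Char)) : pvNews [] ks = PySem.Set.ofList ks := by
  have := pvNews_update ks [] (List.nodup_nil)
  rw [PySem.Set.update_nil_left] at this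
  simpa using this.symm

-- ===== coupling of A's min-array with B's best-array =====
def pvRel (N Lb : Nat) (ml : List (Option Int)) (best : List Int) : Prop :=
  ml.length = N+1 ∧ best.length = N+1 ∧
  ∀ k, k < N+1 → best.getD k 0 = (ml.getD k none).getD 0 ∧
    ∀ w, ml.getD k none = some w → 1 ≤ w ∧ w ≤ (Lb:Int)

lemma pvRel_mono {N Lb Lb' ml best} (h : Lb ≤ Lb') (hr : pvRel N Lb ml best) : pvRel N Lb' ml best := by
  obtain ⟨h1, h2, h3⟩ := hr
  refine ⟨h1, h2, fun k hk => ⟨(h3 k hk).1, fun w hw => ?_⟩⟩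
  obtain ⟨a, b⟩ := (h3 k hk).2 w hw
  constructor
  · exact a
  · calc w ≤ (Lb:Int) := b
      _ ≤ (Lb':Int) := by exact_mod_cast h

lemma pvRel_init (N : Nat) : pvRel N 0 (List.replicate (N+1) none) (List.replicate (N+1) 0) := by
  refine ⟨by simp, by simp, fun k hk => ?_⟩
  rw [List.getD_eq_getElem?_getD, List.getD_eq_getElem?_getD, List.getElem?_replicate,
    List.getElem?_replicate, if_pos hk, if_pos hk]
  exact ⟨rfl, fun w hw => by simp at hw⟩

lemma pvRel_step {N L : Nat} {ml best} (hL : 1 ≤ L) (h : pvRel N L ml best)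
    (c : Nat) (hc1 : 1 ≤ c) (hc2 : c ≤ N) :
    pvRel N L
      (PySem.List.pySetD ml ((c:Nat):Int) (match PySem.List.pyGetD ml ((c:Nat):Int) none with
        | none => some ((L:Nat):Int) | some w => some (min w ((L:Nat):Int))))
      (if PySem.List.pyGetD best ((c:Nat):Int) 0 = 0 then PySem.List.pySetD best ((c:Nat):Int) ((L:Nat):Int) else best) := by
  obtain ⟨h1, h2, h3⟩ := h
  have hget : PySem.List.pyGetD ml ((c:Nat):Int) none = ml.getD c none := by
    simp [PySem.List.pyGetD_natCast]
  have hgetb : PySem.List.pyGetD best ((c:Nat):Int) 0 = best.getD c 0 := by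
    simp [PySem.List.pyGetD_natCast]
  have hbc := (h3 c (by omega)).1
  cases hml : ml.getD c none with
  | none =>
    rw [hget, hgetb, hml, hbc, hml]
    have hv : (match (none : Option Int) with
        | none => some ((L:Nat):Int) | some w => some (min w ((L:Nat):Int))) = some ((L:Nat):Int) := rfl
    rw [hv, if_pos (by simp)]
    rw [PySem.List.pySetD_natCast, PySem.List.pySetD_natCast]
    refine ⟨by simp [h1], by simp [h2], fun k hk => ?_⟩
    by_cases hkc : k = c
    · subst hkc
      rw [List.getD_eq_getElem?_getD, List.getElem?_set_self (by omega),
        List.getD_eq_getElem?_getD, List.getElem?_set_self (by omega)]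
      exact ⟨rfl, fun w hw => by
        simp at hw
        constructor <;> omega⟩
    · rw [List.getD_eq_getElem?_getD, List.getElem?_set_ne (by omega),
        List.getD_eq_getElem?_getD, List.getElem?_set_ne (by omega),
        ← List.getD_eq_getElem?_getD, ← List.getD_eq_getElem?_getD]
      exact h3 k hk
  | some w =>
    obtain ⟨hw1, hw2⟩ := (h3 c (by omega)).2 w hml
    have hmin : min w ((L:Nat):Int) = w := by omega
    rw [hget, hgetb, hml, hbc, hml]
    have hv : (match (some w : Option Int) with
        | none => some ((L:Nat):Int) | some w => some (min w ((L:Nat):Int))) = some (min w ((L:Nat):Int)) := rfl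
    rw [hv, if_neg (by simp; omega)]
    rw [PySem.List.pySetD_natCast, hmin]
    refine ⟨by simp [h1], h2, fun k hk => ?_⟩
    by_cases hkc : k = c
    · rw [hkc]
      have hms : (ml.set c (some w)).getD c none = some w := by
        rw [List.getD_eq_getElem?_getD, List.getElem?_set_self (by omega)]
        simp
      rw [hms, hbc, hml]
      exact ⟨rfl, fun w' hw' => by
        simp at hw'
        subst hw'
        exact ⟨hw1, hw2⟩⟩
    · have hms : (ml.set c (some w)).getD k none = ml.getD k none := by
        rw [List.getD_eq_getElem?_getD, List.getElem?_set_ne (by omega),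
          ← List.getD_eq_getElem?_getD]
      rw [hms]
      exact h3 k hk

lemma pvRel_foldK {N L : Nat} (fA : List (Option Int) → List Char → List (Option Int))
    (fB : List Int → List Char → List Int) :
    ∀ (K : List (List Char)) (ml : List (Option Int)) (best : List Int),
    (∀ T ∈ K, ∀ ml best, pvRel N L ml best → pvRel N L (fA ml T) (fB best T)) →
    pvRel N L ml best → pvRel N L (K.foldl fA ml) (K.foldl fB best) := by
  intro K
  induction K with
  | nil => intro ml best _ h; exact h
  | cons T r ih =>
    intro ml best hstep h
    simp only [List.foldl_cons]
    exact ih _ _ (fun T' hT' => hstep T' (List.mem_cons_of_mem _ hT'))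
      (hstep T (List.mem_cons_self) ml best h)

lemma pvRel_final {N ml best} (h : pvRel N N ml best) :
    (ml.drop 1).map (fun o => o.getD 0) = best.drop 1 := by
  obtain ⟨h1, h2, h3⟩ := h
  apply List.ext_getElem
  · simp [h1, h2]
  · intro i hi1 hi2
    simp only [List.getElem_map, List.getElem_drop]
    have hik : 1 + i < N + 1 := by simp [h1] at hi1; omega
    have hh := (h3 (1+i) hik).1
    have e1 : best.getD (1+i) 0 = best[1+i]'(by omega) := by
      rw [List.getD_eq_getElem?_getD, List.getElem?_eq_getElem (by omega)]; rfl
    have e2 : ml.getD (1+i) none = ml[1+i]'(by omega) := by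
      rw [List.getD_eq_getElem?_getD, List.getElem?_eq_getElem (by omega)]; rfl
    rw [e1, e2] at hh
    exact hh.symm

def pvKeyF (s : List Char) (LI : Int) (i : Int) : List Char :=
  PySem.List.slice s (some i) (some (i + LI))

def pvIdx (s : List Char) (LI : Int) : List Int :=
  PySem.List.pyRange 0 ((s.length:Int) - LI + 1) 1

def pvOccF (s : List Char) (LI : Int) (T : List Char) : List Int :=
  (pvIdx s LI).filter (fun i => pvKeyF s LI i == T)

def pvCov (s : List Char) (LI : Int) (P : List Int) : List Bool :=
  P.foldl (fun cov p => (PySem.List.pyRange p (p + LI - 1) 1).foldl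
    (fun cov j => PySem.List.pySetD cov j true) cov) (List.replicate (s.length - 1) false)

lemma pvKeyF_nat (s : List Char) (L : Nat) (m : Nat) :
    pvKeyF s (L:Int) ((m:Nat):Int) = (s.drop m).take L := by
  rw [pvKeyF]
  have : ((m:Nat):Int) + (L:Int) = (((m + L : Nat)):Int) := by push_cast; ring
  rw [this, PySem.List.slice_natCast]
  congr 1
  omega

lemma pvOcc_pred (s T : List Char) (L : Nat) (hTlen : T.length = L) :
    ∀ i ∈ pvIdx s (L:Int), (pvKeyF s (L:Int) i == T) = decide (T <+: s.drop i.toNat) := by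
  intro i hi
  rw [pvIdx, PySem.List.mem_pyRange_one] at hi
  obtain ⟨m, rfl⟩ : ∃ m : Nat, i = (m:Int) := ⟨i.toNat, by omega⟩
  rw [pvKeyF_nat, Int.toNat_natCast]
  rw [Bool.eq_iff_iff, beq_iff_eq, decide_eq_true_eq]
  rw [List.prefix_iff_eq_take, hTlen]
  exact ⟨fun h => h.symm, fun h => h.symm⟩

-- the central per-substring fact: A's union–find component count equals n − (covered edges of B)
lemma pvCC_eq (s T : List Char) (L : Nat) (hL : 1 ≤ L) (hTlen : T.length = L)
    (k : Nat) (hk : k + L ≤ s.length) (hkey : T <+: s.drop k) :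
    pvCountComponents s T
      = (s.length : Int) - ((pvCov s (L:Int) (pvOccF s (L:Int) T)).count true : Int) ∧
    (pvCov s (L:Int) (pvOccF s (L:Int) T)).length = s.length - 1 := by
  set n := s.length with hn
  have hT : T ≠ [] := by intro h; rw [h] at hTlen; simp at hTlen; omega
  -- positions = pvOccF
  have hpos : pvFindAllAux s T (n+2) 0 [] = pvOccF s (L:Int) T := by
    have h0 : (0:Int) = ((0:Nat):Int) := rfl
    rw [h0, pvFindAllAux_eq s T hT (n+2) 0 [] (by omega) (by omega)]
    rw [List.nil_append]
    simp only [Nat.cast_zero, hTlen, ← hn]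
    rw [pvOccF]
    refine (List.filter_congr (fun i hi => pvOcc_pred s T L hTlen i hi)).symm
  have hmem : ((k:Nat):Int) ∈ pvOccF s (L:Int) T := by
    rw [pvOccF, List.mem_filter]
    constructor
    · rw [pvIdx, PySem.List.mem_pyRange_one]
      constructor
      · exact_mod_cast Nat.zero_le k
      · push_cast; omega
    · rw [pvKeyF_nat, beq_iff_eq]
      rw [List.prefix_iff_eq_take, hTlen] at hkey
      exact hkey.symm
  have hne : pvOccF s (L:Int) T ≠ [] := fun h => by rw [h] at hmem; exact absurd hmem (List.not_mem_nil)
  have hbound : ∀ p ∈ pvOccF s (L:Int) T, 0 ≤ p ∧ p + (L:Int) - 1 ≤ (n:Int) - 1 := by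
    intro p hp
    rw [pvOccF, List.mem_filter, pvIdx, PySem.List.mem_pyRange_one] at hp
    obtain ⟨⟨hp1, hp2⟩, _⟩ := hp
    exact ⟨hp1, by omega⟩
  -- run the union–find / cover coupling
  have hgood := pvPosFold_spec (n := n) (L:Int) (pvOccF s (L:Int) T)
    (PySem.List.pyRange 0 (n:Int) 1) (List.replicate (n-1) false) hbound (pvGood_init n)
  set eF := pvCov s (L:Int) (pvOccF s (L:Int) T) with heF
  have heFlen : eF.length = n - 1 := hgood.2.1
  have hn1 : 1 ≤ n := by omega
  have hcnt : eF.count true ≤ n - 1 := heFlen ▸ List.count_le_length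
  constructor
  · -- compute pvCountComponents
    rw [pvCountComponents]
    simp only [hpos, hTlen, if_neg hne, ← hn]
    -- roots fold
    have hgoodF : pvGood n
        ((pvOccF s (L:Int) T).foldl (fun par pos =>
          (PySem.List.pyRange pos (pos + (L:Int) - 1) 1).foldl
            (fun par i => pvDsuUnion par i (i+1)) par) (PySem.List.pyRange 0 (n:Int) 1)) eF := hgood
    rw [pvRootsFold_spec (n := n) eF _ _ _ hgoodF
      (fun i hi => by rw [PySem.List.mem_pyRange_one] at hi; exact hi)]
    -- turn the Int-fold into the ofList image
    have hfold : (PySem.List.pyRange 0 (n:Int) 1).foldl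
        (fun s i => PySem.Set.add s ((pvLeader eF i.toNat : Nat):Int)) (PySem.Set.empty : PySem.Set Int)
        = PySem.Set.ofList ((List.range n).map (fun x => ((pvLeader eF x : Nat):Int))) := by
      rw [PySem.List.pyRange_one, List.foldl_map]
      rw [← PySem.Set.update_map_eq_foldl_add, PySem.Set.update_empty]
      congr 1
      have hnn : ((n:Int) - 0).toNat = n := by omega
      rw [hnn]
      exact List.map_congr_left (fun x hx => by simp)
    rw [hfold]
    have hcard := pvCount_leaders eF
    rw [heFlen] at hcard
    have hsz : (PySem.Set.ofList ((List.range (n-1+1)).map (fun x => ((pvLeader eF x : Nat):Int)))).length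
        = n - eF.count true := by
      rw [hcard]; omega
    have hrange : n - 1 + 1 = n := by omega
    rw [hrange] at hsz
    rw [PySem.Set.len, hsz]
    push_cast [Nat.cast_sub (by omega : eF.count true ≤ n)]
    ring
  · exact heFlen

lemma pvPerLength (s : List Char) (L : Nat) (hL1 : 1 ≤ L) (hLN : L ≤ s.length)
    (ml : List (Option Int)) (best : List Int) (h : pvRel s.length L ml best) :
    pvRel s.length L
      (((PySem.List.pyRange 0 ((s.length:Int) - ((L:Nat):Int) + 1) 1).foldl
        (fun (st : PySem.Set (List Char) × List (Option Int)) i =>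
          let T := PySem.List.slice s (some i) (some (i + ((L:Nat):Int)))
          if PySem.Set.contains st.1 T then st
          else
            let seen' := PySem.Set.add st.1 T
            let c := pvCountComponents s T
            if c ≤ ((s.length:Int)) then
              let v : Option Int := match PySem.List.pyGetD st.2 c none with
                | none => some ((L:Nat):Int)
                | some w => some (min w ((L:Nat):Int))
              (seen', PySem.List.pySetD st.2 c v)
            else (seen', st.2))
        ((PySem.Set.empty : PySem.Set (List Char)), ml)).2)
      (let groups := (PySem.List.pyRange 0 ((s.length:Int) - ((L:Nat):Int) + 1) 1).foldl
          (fun (d : PySem.Dict (List Char) (List Int)) i =>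
            d.modify (PySem.List.slice s (some i) (some (i + ((L:Nat):Int)))) [] (· ++ [i])) PySem.Dict.empty
       groups.values.foldl (fun best occ =>
          let covered := occ.foldl (fun cov p =>
            (PySem.List.pyRange p (p + ((L:Nat):Int) - 1) 1).foldl
              (fun cov j => PySem.List.pySetD cov j true) cov) (List.replicate (s.length - 1) false)
          let c := ((s.length:Int)) - (covered.count true : Int)
          if PySem.List.pyGetD best c 0 = 0 then PySem.List.pySetD best c ((L:Nat):Int) else best) best) := by
  classical
  set F : List (Option Int) → List Char → List (Option Int) := fun ml T =>
    if pvCountComponents s T ≤ (s.length:Int) then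
      PySem.List.pySetD ml (pvCountComponents s T)
        (match PySem.List.pyGetD ml (pvCountComponents s T) none with
          | none => some ((L:Nat):Int) | some w => some (min w ((L:Nat):Int)))
    else ml with hF
  set Fb : List Int → List Char → List Int := fun best T =>
    if PySem.List.pyGetD best ((s.length:Int) - ((pvCov s ((L:Nat):Int) (pvOccF s ((L:Nat):Int) T)).count true : Int)) 0 = 0
    then PySem.List.pySetD best ((s.length:Int) - ((pvCov s ((L:Nat):Int) (pvOccF s ((L:Nat):Int) T)).count true : Int)) ((L:Nat):Int)
    else best with hFb
  have hA : ((PySem.List.pyRange 0 ((s.length:Int) - ((L:Nat):Int) + 1) 1).foldl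
        (fun (st : PySem.Set (List Char) × List (Option Int)) i =>
          let T := PySem.List.slice s (some i) (some (i + ((L:Nat):Int)))
          if PySem.Set.contains st.1 T then st
          else
            let seen' := PySem.Set.add st.1 T
            let c := pvCountComponents s T
            if c ≤ ((s.length:Int)) then
              let v : Option Int := match PySem.List.pyGetD st.2 c none with
                | none => some ((L:Nat):Int)
                | some w => some (min w ((L:Nat):Int))
              (seen', PySem.List.pySetD st.2 c v)
            else (seen', st.2))
        ((PySem.Set.empty : PySem.Set (List Char)), ml)).2
      = (PySem.Set.ofList ((PySem.List.pyRange 0 ((s.length:Int) - ((L:Nat):Int) + 1) 1).map (pvKeyF s ((L:Nat):Int)))).foldl F ml := by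
    have h1 : ((PySem.List.pyRange 0 ((s.length:Int) - ((L:Nat):Int) + 1) 1).map (pvKeyF s ((L:Nat):Int))).foldl
        (fun (st : PySem.Set (List Char) × List (Option Int)) T =>
          if PySem.Set.contains st.1 T then st
          else (PySem.Set.add st.1 T, F st.2 T)) ((PySem.Set.empty : PySem.Set (List Char)), ml)
        = (PySem.List.pyRange 0 ((s.length:Int) - ((L:Nat):Int) + 1) 1).foldl
        (fun (st : PySem.Set (List Char) × List (Option Int)) i =>
          let T := PySem.List.slice s (some i) (some (i + ((L:Nat):Int)))
          if PySem.Set.contains st.1 T then st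
          else
            let seen' := PySem.Set.add st.1 T
            let c := pvCountComponents s T
            if c ≤ ((s.length:Int)) then
              let v : Option Int := match PySem.List.pyGetD st.2 c none with
                | none => some ((L:Nat):Int)
                | some w => some (min w ((L:Nat):Int))
              (seen', PySem.List.pySetD st.2 c v)
            else (seen', st.2)) ((PySem.Set.empty : PySem.Set (List Char)), ml) := by
      rw [List.foldl_map]
      congr 1
      funext st i
      show _ = (if PySem.Set.contains st.1 (pvKeyF s ((L:Nat):Int) i) then st
        else if pvCountComponents s (pvKeyF s ((L:Nat):Int) i) ≤ ((s.length:Int)) then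
          (PySem.Set.add st.1 (pvKeyF s ((L:Nat):Int) i), PySem.List.pySetD st.2 (pvCountComponents s (pvKeyF s ((L:Nat):Int) i))
            (match PySem.List.pyGetD st.2 (pvCountComponents s (pvKeyF s ((L:Nat):Int) i)) none with
              | none => some ((L:Nat):Int)
              | some w => some (min w ((L:Nat):Int))))
          else (PySem.Set.add st.1 (pvKeyF s ((L:Nat):Int) i), st.2))
      by_cases hc : PySem.Set.contains st.1 (pvKeyF s ((L:Nat):Int) i)
      · rw [if_pos hc, if_pos hc]
      · rw [if_neg hc, if_neg hc]
        simp only [hF]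
        by_cases hcc : pvCountComponents s (pvKeyF s ((L:Nat):Int) i) ≤ (s.length:Int)
        · rw [if_pos hcc, if_pos hcc]
        · rw [if_neg hcc, if_neg hcc]
    rw [← h1, pvA_fold F _ PySem.Set.empty ml]
    have h2 : pvNews PySem.Set.empty ((PySem.List.pyRange 0 ((s.length:Int) - ((L:Nat):Int) + 1) 1).map (pvKeyF s ((L:Nat):Int)))
        = PySem.Set.ofList ((PySem.List.pyRange 0 ((s.length:Int) - ((L:Nat):Int) + 1) 1).map (pvKeyF s ((L:Nat):Int))) :=
      pvNews_nil_eq _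
    rw [h2]
  have hB : (let groups := (PySem.List.pyRange 0 ((s.length:Int) - ((L:Nat):Int) + 1) 1).foldl
                  (fun (d : PySem.Dict (List Char) (List Int)) i =>
                    d.modify (PySem.List.slice s (some i) (some (i + ((L:Nat):Int)))) [] (· ++ [i])) PySem.Dict.empty
             groups.values.foldl (fun best occ =>
                  let covered := occ.foldl (fun cov p =>
                    (PySem.List.pyRange p (p + ((L:Nat):Int) - 1) 1).foldl
                      (fun cov j => PySem.List.pySetD cov j true) cov) (List.replicate (s.length - 1) false)
                  let c := ((s.length:Int)) - (covered.count true : Int)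
                  if PySem.List.pyGetD best c 0 = 0 then PySem.List.pySetD best c ((L:Nat):Int) else best) best)
      = (PySem.Set.ofList ((PySem.List.pyRange 0 ((s.length:Int) - ((L:Nat):Int) + 1) 1).map (pvKeyF s ((L:Nat):Int)))).foldl Fb best := by
    show ((PySem.List.pyRange 0 ((s.length:Int) - ((L:Nat):Int) + 1) 1).foldl
          (fun (d : PySem.Dict (List Char) (List Int)) i =>
            d.modify (pvKeyF s ((L:Nat):Int) i) [] (· ++ [i])) PySem.Dict.empty).values.foldl
        (fun best occ =>
          let covered := occ.foldl (fun cov p =>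
            (PySem.List.pyRange p (p + ((L:Nat):Int) - 1) 1).foldl
              (fun cov j => PySem.List.pySetD cov j true) cov) (List.replicate (s.length - 1) false)
          let c := ((s.length:Int)) - (covered.count true : Int)
          if PySem.List.pyGetD best c 0 = 0 then PySem.List.pySetD best c ((L:Nat):Int) else best) best = _
    rw [pvGroups_values _ (pvKeyF s ((L:Nat):Int)), List.foldl_map]
    rfl
  rw [hA, hB]
  apply pvRel_foldK F Fb _ ml best _ h
  intro T hT ml' best' hr
  rw [PySem.Set.mem_ofList, List.mem_map] at hT
  obtain ⟨i, hil, rfl⟩ := hT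
  rw [PySem.List.mem_pyRange_one] at hil
  obtain ⟨m, rfl⟩ : ∃ m : Nat, i = (m:Int) := ⟨i.toNat, by omega⟩
  have hmL : m + L ≤ s.length := by
    have := hil.2
    push_cast at this
    omega
  have hkeyT : pvKeyF s ((L:Nat):Int) ((m:Nat):Int) = (s.drop m).take L := pvKeyF_nat s L m
  have hTlen : (pvKeyF s ((L:Nat):Int) ((m:Nat):Int)).length = L := by
    rw [hkeyT]
    simp [List.length_take, List.length_drop]
    omega
  have hpref : pvKeyF s ((L:Nat):Int) ((m:Nat):Int) <+: s.drop m := by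
    rw [hkeyT]; exact List.take_prefix _ _
  obtain ⟨hcc, hclen⟩ := pvCC_eq s (pvKeyF s ((L:Nat):Int) ((m:Nat):Int)) L hL1 hTlen m (by omega) hpref
  have hcnt : (pvCov s ((L:Nat):Int) (pvOccF s ((L:Nat):Int) (pvKeyF s ((L:Nat):Int) ((m:Nat):Int)))).count true ≤ s.length - 1 := by
    have h1 : (pvCov s ((L:Nat):Int) (pvOccF s ((L:Nat):Int) (pvKeyF s ((L:Nat):Int) ((m:Nat):Int)))).count true
        ≤ (pvCov s ((L:Nat):Int) (pvOccF s ((L:Nat):Int) (pvKeyF s ((L:Nat):Int) ((m:Nat):Int)))).length := List.count_le_length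
    omega
  have hcast : (s.length:Int) - ((pvCov s ((L:Nat):Int) (pvOccF s ((L:Nat):Int) (pvKeyF s ((L:Nat):Int) ((m:Nat):Int)))).count true : Int)
      = (((s.length - (pvCov s ((L:Nat):Int) (pvOccF s ((L:Nat):Int) (pvKeyF s ((L:Nat):Int) ((m:Nat):Int)))).count true : Nat)):Int) := by
    push_cast [Nat.cast_sub (by omega : (pvCov s ((L:Nat):Int) (pvOccF s ((L:Nat):Int) (pvKeyF s ((L:Nat):Int) ((m:Nat):Int)))).count true ≤ s.length)]
    ring
  rw [hF, hFb]
  simp only []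
  rw [hcc]
  rw [hcast, if_pos (by exact_mod_cast Nat.sub_le s.length _)]
  exact pvRel_step hL1 hr _ (by omega) (by omega)

lemma pvOuter (N : Nat) (stepA : List (Option Int) → Int → List (Option Int)) (stepB : List Int → Int → List Int)
    (hstep : ∀ (L : Nat) ml best, 1 ≤ L → L ≤ N → pvRel N L ml best →
      pvRel N L (stepA ml ((L:Nat):Int)) (stepB best ((L:Nat):Int))) :
    ∀ (d a : Nat) (ml : List (Option Int)) (best : List Int), a + d = N → pvRel N a ml best →
    pvRel N N ((PySem.List.pyRange ((a:Int)+1) ((N:Int)+1) 1).foldl stepA ml)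
              ((PySem.List.pyRange ((a:Int)+1) ((N:Int)+1) 1).foldl stepB best) := by
  intro d
  induction d with
  | zero =>
    intro a ml best ha hr
    rw [PySem.List.pyRange_one_eq_nil (by omega)]
    simp only [List.foldl_nil]
    have : a = N := by omega
    rwa [this] at hr
  | succ d ih =>
    intro a ml best ha hr
    have hc : ((a:Int)+1) = (((a+1:Nat)):Int) := by push_cast; ring
    rw [hc, PySem.List.pyRange_one_cons (by push_cast; omega)]
    simp only [List.foldl_cons]
    exact ih (a+1) _ _ (by omega)
      (hstep (a+1) ml best (by omega) (by omega) (pvRel_mono (by omega) hr))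

theorem pvMain (S : String) : find_minimum_lengths S = find_minimum_lengths_alt S := by
  rw [find_minimum_lengths, find_minimum_lengths_alt]
  have h1 : (1:Int) = ((0:Nat):Int) + 1 := by norm_num
  rw [h1]
  apply pvRel_final
  apply pvOuter S.toList.length _ _ _ S.toList.length 0 _ _ (by omega) (pvRel_init _)
  intro L ml best hL1 hLN hr
  exact pvPerLength S.toList L hL1 hLN ml best hr

-- ===== VERDICT (by name: the statement is the Claim_ definition above) =====
theorem find_minimum_lengths_spec : Claim_equal_find_minimum_lengths := by
  intro S _
  unfold Spec_find_minimum_lengths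
  exact pvMain S
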